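-- pv_equiv track=rewrite | github.com/MuyaoLi-jimo/jarvis-train | ultron/model/inference/action_mapping.py | custom_seq_2_decimal
-- ===== SOURCE A (Python) =====
-- def custom_seq_2_decimal(number_tuple:tuple, bases:list = [10,3,3,3,2,2,2,2,2,21,21]) -> tuple:
--     '''
--     假如bases为[10,3,3,3,2,2,2,2,2,11,11]
--     Function: 将一个具有不同基数的数字系统(每位的基数分别为 [8, 8, 8, 6, 5])转换为十进制整数, 需要编写一个Python函数来执行逆向计算。这个转换涉及将每位的值乘以对应的基数的幂, 然后再求和。
--     Examples:
--     1. custom_base_to_decimal((0, 0, 0, 0, 1)) -> 1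
--     2. custom_base_to_decimal((7, 7, 7, 5, 4)) -> 15359
--     :output: int, 十进制整数
--     :number_tuple: tuple, 每位的值
--     :bases: list, 每位的基数
--     '''
--     # 确保输入的长度与基数匹配
--     if len(number_tuple) != len(bases):
--         raise ValueError("The input number does not match the expected number of digits.")
--     # 初始化十进制结果
--     decimal_results = [0,0]
--     # 计算十进制值
--     mid = len(number_tuple)-2
--     for i, digit in enumerate(number_tuple):
--         if digit >= bases[i]:
--             raise ValueError(f"Digit at position {i} exceeds the base limit of {bases[i]-1}.")
--         if i < mid:
--             decimal_results[0] = decimal_results[0] * bases[i] + digit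
--         else:
--             decimal_results[1] = decimal_results[1] * bases[i] + digit
--     return tuple(decimal_results)
-- ===== SOURCE B (Python) =====
-- def custom_seq_2_decimal(number_tuple: tuple, bases: list = [10,3,3,3,2,2,2,2,2,21,21]) -> tuple:
--     n = len(number_tuple)
--     if n != len(bases):
--         raise ValueError("The input number does not match the expected number of digits.")
--     for i, digit in enumerate(number_tuple):
--         if digit >= bases[i]:
--             raise ValueError(f"Digit at position {i} exceeds the base limit of {bases[i]-1}.")
--     k = max(n - 2, 0)
--
--     def weights(bs):
--         w = []
--         p = 1
--         for b in reversed(bs):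
--             w.append(p)
--             p *= b
--         return w[::-1]
--
--     head_w = weights(bases[:k])
--     tail_w = weights(bases[k:])
--     head = sum(d * w for d, w in zip(number_tuple[:k], head_w))
--     tail = sum(d * w for d, w in zip(number_tuple[k:], tail_w))
--     return (head, tail)
-- ===== Notes on version B (the rewrite author's own statement) =====
-- stated objective: alternative
-- what changed: Replaces the two Horner accumulations interleaved in one enumerate loop by an explicit place-value formulation: validate all digits first, then compute per-group positional weights (suffix products, built right-to-left) and return the two weighted sums.
import Mathlib
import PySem

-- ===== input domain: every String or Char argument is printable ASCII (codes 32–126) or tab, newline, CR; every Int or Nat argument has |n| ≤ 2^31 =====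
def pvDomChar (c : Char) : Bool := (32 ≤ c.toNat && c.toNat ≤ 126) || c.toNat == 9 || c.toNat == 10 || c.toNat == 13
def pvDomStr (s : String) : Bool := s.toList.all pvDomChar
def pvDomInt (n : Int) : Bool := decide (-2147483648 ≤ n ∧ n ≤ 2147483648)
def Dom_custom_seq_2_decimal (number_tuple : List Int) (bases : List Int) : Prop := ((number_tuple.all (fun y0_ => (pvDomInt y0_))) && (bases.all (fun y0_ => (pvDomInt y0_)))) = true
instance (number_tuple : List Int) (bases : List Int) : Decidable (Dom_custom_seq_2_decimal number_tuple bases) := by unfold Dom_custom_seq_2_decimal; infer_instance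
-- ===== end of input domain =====

-- ===== PORT A =====
-- B differs from A by an explicit place-value formulation (validate-then-weighted-sum) instead of
-- A's two interleaved Horner accumulations; same O(n) cost ("alternative", not faster).
-- Loop of A: i counts positions, r0/r1 are the two Horner accumulators; `none` = the ValueError
-- raised at the first digit with digit >= bases[i] (lengths are equal here, so bases[i] is the
-- head of the remaining bases).
def pvALoop (ds bs : List Int) (i mid r0 r1 : Int) : Option (Int × Int) :=
  match ds, bs with
  | [], _ => some (r0, r1)
  | _ :: _, [] => none
  | d :: ds', b :: bs' =>
    if d ≥ b then none
    else if i < mid then pvALoop ds' bs' (i + 1) mid (r0 * b + d) r1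
    else pvALoop ds' bs' (i + 1) mid r0 (r1 * b + d)

def custom_seq_2_decimal (number_tuple : List Int) (bases : List Int) : List Int :=
  if number_tuple.length ≠ bases.length then []   -- ValueError: length mismatch
  else
    -- mid = len(number_tuple) - 2
    match pvALoop number_tuple bases 0 ((number_tuple.length : Int) - 2) 0 0 with
    | none => []                                   -- ValueError: digit exceeds base
    | some (a, b) => [a, b]

-- ===== PORT B =====
-- Source B weights(bs): append running suffix products while scanning reversed(bs), then reverse.
def pvWeights (bs : List Int) : List Int :=
  ((bs.reverse.foldl (fun (st : List Int × Int) b => (st.1 ++ [st.2], st.2 * b)) ([], 1)).1).reverse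

def custom_seq_2_decimal_alt (number_tuple : List Int) (bases : List Int) : List Int :=
  if number_tuple.length ≠ bases.length then []   -- ValueError: length mismatch
  else if ¬ (number_tuple.zip bases).all (fun p => decide (p.1 < p.2)) then []  -- ValueError at first offending digit
  else
    -- k = max(n - 2, 0); head/tail = the two weighted sums
    [(List.zipWith (· * ·) (number_tuple.take (max ((number_tuple.length : Int) - 2) 0).toNat)
        (pvWeights (bases.take (max ((number_tuple.length : Int) - 2) 0).toNat))).sum,
     (List.zipWith (· * ·) (number_tuple.drop (max ((number_tuple.length : Int) - 2) 0).toNat)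
        (pvWeights (bases.drop (max ((number_tuple.length : Int) - 2) 0).toNat))).sum]

-- ===== PRECONDITION & SPEC =====
-- Pre_ excludes exactly the inputs on which A raises ValueError: mismatched lengths, or some
-- digit not below its base.
def Pre_custom_seq_2_decimal (number_tuple : List Int) (bases : List Int) : Prop :=
  number_tuple.length = bases.length ∧ ∀ p ∈ number_tuple.zip bases, p.1 < p.2
instance (number_tuple : List Int) (bases : List Int) : Decidable (Pre_custom_seq_2_decimal number_tuple bases) := by unfold Pre_custom_seq_2_decimal; infer_instance

def pvWitness_custom_seq_2_decimal : List Int × List Int := ([7, 2, 1], [10, 3, 2])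

def Spec_custom_seq_2_decimal (number_tuple : List Int) (bases : List Int) (out : List Int) : Prop := out = custom_seq_2_decimal_alt number_tuple bases
instance (number_tuple : List Int) (bases : List Int) (out : List Int) : Decidable (Spec_custom_seq_2_decimal number_tuple bases out) := by unfold Spec_custom_seq_2_decimal; infer_instance

-- ===== CLAIM (what is proved, stated in full; the proofs are below) =====
def Claim_equal_custom_seq_2_decimal : Prop := ∀ (number_tuple : List Int) (bases : List Int), Dom_custom_seq_2_decimal number_tuple bases → Pre_custom_seq_2_decimal number_tuple bases → Spec_custom_seq_2_decimal number_tuple bases (custom_seq_2_decimal number_tuple bases)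

-- ===== LEMMAS AND PROOFS =====

-- Suffix products, the reference form of B's weight computation.
def pvPP (p : Int) : List Int → List Int
  | [] => []
  | b :: l => p :: pvPP (p * b) l

theorem pvPP_append (l : List Int) (b p : Int) :
    pvPP p (l ++ [b]) = pvPP p l ++ [p * l.prod] := by
  induction l generalizing p with
  | nil => simp [pvPP]
  | cons x l ih => simp [pvPP, ih, List.prod_cons, mul_assoc]

theorem pvWeights_foldl (l : List Int) (w : List Int) (p : Int) :
    l.foldl (fun (st : List Int × Int) b => (st.1 ++ [st.2], st.2 * b)) (w, p)
      = (w ++ pvPP p l, p * l.prod) := by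
  induction l generalizing w p with
  | nil => simp [pvPP]
  | cons b l ih => simp [List.foldl_cons, ih, pvPP, List.prod_cons, mul_assoc]

theorem pvWeights_cons (b : Int) (bs : List Int) :
    pvWeights (b :: bs) = bs.prod :: pvWeights bs := by
  simp only [pvWeights, List.reverse_cons, pvWeights_foldl, List.nil_append]
  rw [pvPP_append]
  simp [List.prod_reverse]

-- Horner's scheme: the reference form of A's accumulators.
def pvHorner (a : Int) : List Int → List Int → Int
  | d :: ds, b :: bs => pvHorner (a * b + d) ds bs
  | _, _ => a

theorem pvHorner_eq_wsum (ds bs : List Int) (a : Int) (h : ds.length = bs.length) :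
    pvHorner a ds bs = a * bs.prod + (List.zipWith (· * ·) ds (pvWeights bs)).sum := by
  induction ds generalizing bs a with
  | nil =>
    cases bs with
    | nil => simp [pvHorner, pvWeights]
    | cons b bs => simp at h
  | cons d ds ih =>
    cases bs with
    | nil => simp at h
    | cons b bs =>
      simp only [List.length_cons, Nat.add_right_cancel_iff] at h
      simp only [pvHorner, pvWeights_cons, List.zipWith_cons_cons, List.sum_cons,
        List.prod_cons, ih _ _ h]
      ring

-- A's loop, fully characterised: splits at t = (mid - i).toNat remaining head positions,
-- returns the two Horner values, never raises when all zipped digits are below their bases.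
theorem pvALoop_eq (ds bs : List Int) (i mid r0 r1 : Int)
    (hlen : ds.length = bs.length)
    (hok : ∀ p ∈ ds.zip bs, p.1 < p.2) :
    pvALoop ds bs i mid r0 r1 =
      some (pvHorner r0 (ds.take (mid - i).toNat) (bs.take (mid - i).toNat),
            pvHorner r1 (ds.drop (mid - i).toNat) (bs.drop (mid - i).toNat)) := by
  induction ds generalizing bs i r0 r1 with
  | nil =>
    cases bs with
    | nil => simp [pvALoop, pvHorner]
    | cons b bs => simp at hlen
  | cons d ds ih =>
    cases bs with
    | nil => simp at hlen
    | cons b bs =>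
      simp only [List.length_cons, Nat.add_right_cancel_iff] at hlen
      have hd : d < b := hok (d, b) (by simp)
      have hok' : ∀ p ∈ ds.zip bs, p.1 < p.2 := fun p hp => hok p (by simp [hp])
      simp only [pvALoop, ge_iff_le, not_le.2 hd, if_false]
      by_cases hi : i < mid
      · have ht : (mid - i).toNat = (mid - (i + 1)).toNat + 1 := by omega
        rw [if_pos hi, ih bs (i + 1) (r0 * b + d) r1 hlen hok', ht]
        simp [pvHorner]
      · have ht : (mid - i).toNat = 0 := by omega
        have ht' : (mid - (i + 1)).toNat = 0 := by omega
        rw [if_neg hi, ih bs (i + 1) r0 (r1 * b + d) hlen hok', ht, ht']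
        simp [pvHorner]

-- ===== VERDICT (by name: the statement is the Claim_ definition above) =====
theorem custom_seq_2_decimal_spec : Claim_equal_custom_seq_2_decimal := by
  intro nt bs _ hpre
  obtain ⟨hlen, hok⟩ := hpre
  unfold Spec_custom_seq_2_decimal custom_seq_2_decimal custom_seq_2_decimal_alt
  rw [if_neg (by simp [hlen]), if_neg (by simp [hlen])]
  rw [if_neg (by
    simp only [not_not, List.all_eq_true, decide_eq_true_eq]
    exact fun p hp => hok p hp)]
  have hk : (max ((nt.length : Int) - 2) 0).toNat = ((nt.length : Int) - 2 - 0).toNat := by omega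
  rw [pvALoop_eq nt bs 0 ((nt.length : Int) - 2) 0 0 hlen hok]
  have hlt : (nt.take ((nt.length : Int) - 2 - 0).toNat).length
      = (bs.take ((nt.length : Int) - 2 - 0).toNat).length := by simp [hlen]
  have hld : (nt.drop ((nt.length : Int) - 2 - 0).toNat).length
      = (bs.drop ((nt.length : Int) - 2 - 0).toNat).length := by simp [hlen]
  simp only [hk, pvHorner_eq_wsum _ _ _ hlt, pvHorner_eq_wsum _ _ _ hld, zero_mul, zero_add]
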